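-- pv_equiv track=rewrite | github.com/jpjamal/cs-skin-carteira-stream-lit | tools/build_current_skin_catalog.py | strip_color_suffixes
-- ===== SOURCE A (Python) =====
-- COLOR_SUFFIXES = {
--     "(Roxo)",
--     "(Azul)",
--     "(Rosa)",
--     "(Vermelho)",
--     "(Dourado)",
--     "(Verde)",
--     "(Laranja)",
--     "(Amarelo)",
--     "(Branco)",
--     "(Preto)",
-- }
--
-- def strip_color_suffixes(name: str) -> str:
--     text = (name or "").strip()
--     changed = True
--     while changed:
--         changed = False
--         for suffix in COLOR_SUFFIXES:
--             token = f" {suffix}"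
--             if text.endswith(token):
--                 text = text[: -len(token)].strip()
--                 changed = True
--     return text
-- ===== SOURCE B (Python) =====
-- _COLORS = ("Roxo", "Azul", "Rosa", "Vermelho", "Dourado", "Verde",
--            "Laranja", "Amarelo", "Branco", "Preto")
--
-- def strip_color_suffixes(name: str) -> str:
--     text = (name or "").strip()
--     rev = text[::-1]
--     tokens = tuple(")" + c[::-1] + "( " for c in _COLORS)
--     i = 0
--     matched = True
--     while matched:
--         matched = False
--         j = i
--         while j < len(rev) and rev[j].isspace():
--             j += 1
--         for tok in tokens:
--             if rev.startswith(tok, j):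
--                 i = j + len(tok)
--                 matched = True
--                 break
--     return text[: len(text) - i].rstrip()
-- ===== Notes on version B (the rewrite author's own statement) =====
-- stated objective: alternative
-- what changed: Replaces the while/changed-flag loop that repeatedly re-slices and re-strips the string with a single backward index scan over the reversed string: it skips whitespace and consumes whole '(Color)' groups by index arithmetic, slicing the string only once at the end.
import Mathlib
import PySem

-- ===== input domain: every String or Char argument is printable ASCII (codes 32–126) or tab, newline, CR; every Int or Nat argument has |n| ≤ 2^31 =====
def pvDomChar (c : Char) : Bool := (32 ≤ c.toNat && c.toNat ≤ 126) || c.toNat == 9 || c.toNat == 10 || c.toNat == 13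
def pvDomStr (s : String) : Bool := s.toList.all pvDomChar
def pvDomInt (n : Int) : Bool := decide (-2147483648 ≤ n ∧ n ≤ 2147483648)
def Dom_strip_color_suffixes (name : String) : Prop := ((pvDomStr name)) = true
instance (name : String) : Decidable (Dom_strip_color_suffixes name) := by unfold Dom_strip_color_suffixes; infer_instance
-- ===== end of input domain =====

-- B replaces the while/changed-flag loop that repeatedly re-slices and re-strips the string
-- by a single backward index scan over the reversed string (objective: alternative).


-- ===== PORT A =====
-- COLOR_SUFFIXES (a Python set of distinct string literals; the result below is
-- independent of iteration order, the literal order is used)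
def suffsA : List (List Char) :=
  ["(Roxo)".toList, "(Azul)".toList, "(Rosa)".toList, "(Vermelho)".toList, "(Dourado)".toList,
   "(Verde)".toList, "(Laranja)".toList, "(Amarelo)".toList, "(Branco)".toList, "(Preto)".toList]

-- the body of `for suffix in COLOR_SUFFIXES: …` (one pass; `changed` is the flag)
def forPassA : List (List Char) → List Char → Bool → List Char × Bool
  | [], text, changed => (text, changed)
  | s :: rest, text, changed =>
    let token := ' ' :: s                                   -- f" {suffix}"
    if PySem.Chars.endswith text token then
      forPassA rest
        (PySem.Chars.strip (PySem.Chars.slice text none (some (-(token.length : Int))))) true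
    else
      forPassA rest text changed

-- `while changed:` loop; the fuel only makes the recursion structural — each changed
-- pass strictly shortens the text, so text.length + 1 steps always suffice
def whileAF : Nat → List Char → List Char
  | 0, text => text
  | fuel + 1, text =>
    let r := forPassA suffsA text false
    if r.2 = true then whileAF fuel r.1 else r.1

def whileA (text : List Char) : List Char := whileAF (text.length + 1) text

def strip_color_suffixes (name : String) : String :=
  String.mk (whileA (PySem.Chars.strip name.toList))   -- text = (name or "").strip(); loop; return text

-- ===== PORT B =====
def colorsB : List (List Char) :=
  ["Roxo".toList, "Azul".toList, "Rosa".toList, "Vermelho".toList, "Dourado".toList,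
   "Verde".toList, "Laranja".toList, "Amarelo".toList, "Branco".toList, "Preto".toList]

-- tokens = tuple(")" + c[::-1] + "( " for c in _COLORS)
def tokensB : List (List Char) := colorsB.map (fun c => ')' :: (c.reverse ++ ['(', ' ']))

-- while j < len(rev) and rev[j].isspace(): j += 1   (str.isspace on one char = Chars.isspace,
-- exact); fuel rev.length - j makes the scan structural and is always enough
def skipWsBF : Nat → List Char → Nat → Nat
  | 0, _, j => j
  | fuel + 1, rev, j =>
    if h : j < rev.length then
      if PySem.Chars.isspace rev[j] then skipWsBF fuel rev (j + 1) else j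
    else j

def skipWsB (rev : List Char) (j : Nat) : Nat := skipWsBF (rev.length - j) rev j

-- for tok in tokens: if rev.startswith(tok, j): i = j + len(tok) … (startswith with a
-- start offset 0 ≤ j is exact as startswith on rev[j:])
def findTokB : List (List Char) → List Char → Nat → Option Nat
  | [], _, _ => none
  | tok :: rest, rev, j =>
    if PySem.Chars.startswith (rev.drop j) tok then some (j + tok.length)
    else findTokB rest rev j

-- while matched: … (the index i only grows; each round moves it by at least one, so
-- rev.length + 1 - i rounds of fuel always suffice)
def loopBF : Nat → List Char → Nat → Nat
  | 0, _, i => i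
  | fuel + 1, rev, i =>
    let j := skipWsB rev i
    match findTokB tokensB rev j with
    | some i' => loopBF fuel rev i'
    | none => i

def loopB (rev : List Char) (i : Nat) : Nat := loopBF (rev.length + 1 - i) rev i

def strip_color_suffixes_alt (name : String) : String :=
  let text := PySem.Chars.strip name.toList              -- text = (name or "").strip()
  let rev := text.reverse                                -- rev = text[::-1]
  let i := loopB rev 0
  -- return text[: len(text) - i].rstrip()
  String.mk (PySem.Chars.rstrip (PySem.Chars.slice text none (some ((text.length : Int) - i))))

-- ===== PRECONDITION & SPEC =====
def Spec_strip_color_suffixes (name : String) (out : String) : Prop := out = strip_color_suffixes_alt name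
instance (name : String) (out : String) : Decidable (Spec_strip_color_suffixes name out) := by unfold Spec_strip_color_suffixes; infer_instance

-- ===== CLAIM (what is proved, stated in full; the proofs are below) =====
def Claim_equal_strip_color_suffixes : Prop := ∀ (name : String), Dom_strip_color_suffixes name → Spec_strip_color_suffixes name (strip_color_suffixes name)

-- ===== LEMMAS AND PROOFS =====

theorem pv_len_strip_le (s : List Char) : (PySem.Chars.strip s).length ≤ s.length := by
  simp [PySem.Chars.strip, PySem.Chars.rstrip, PySem.Chars.lstrip]
  calc (List.dropWhile PySem.Chars.isspace (List.dropWhile PySem.Chars.isspace s).reverse).length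
      ≤ (List.dropWhile PySem.Chars.isspace s).reverse.length := List.length_dropWhile_le _ _
    _ ≤ s.length := by simpa using List.length_dropWhile_le PySem.Chars.isspace s

theorem pv_len_slice_neg_lt (xs : List Char) (i : Int) (h1 : i ≤ -1) (h0 : xs ≠ []) :
    (PySem.Chars.slice xs none (some i)).length < xs.length := by
  have hlen : 0 < xs.length := List.length_pos_iff.mpr h0
  simp only [PySem.Chars.slice_eq_listSlice, PySem.List.slice, PySem.List.clampIdx]
  split_ifs <;> simp [List.length_take] <;> omega

theorem forPassA_fst_le (ss : List (List Char)) (text : List Char) (ch : Bool) :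
    (forPassA ss text ch).1.length ≤ text.length := by
  induction ss generalizing text ch with
  | nil => simp [forPassA]
  | cons s rest ih =>
    simp only [forPassA]
    split_ifs with hend
    · refine le_trans (ih _ _) (le_trans (pv_len_strip_le _) ?_)
      have hne : text ≠ [] := by
        intro hnil; rw [hnil] at hend; simp [PySem.Chars.endswith, List.isSuffixOf] at hend
      exact le_of_lt (pv_len_slice_neg_lt _ _ (by push_cast [List.length_cons]; omega) hne)
    · exact ih _ _

theorem forPassA_true (ss : List (List Char)) (text : List Char) :
    (forPassA ss text true).2 = true := by
  induction ss generalizing text with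
  | nil => simp [forPassA]
  | cons s rest ih => simp only [forPassA]; split_ifs <;> exact ih _

theorem forPassA_lt (ss : List (List Char)) (text : List Char)
    (h : (forPassA ss text false).2 = true) :
    (forPassA ss text false).1.length < text.length := by
  induction ss generalizing text with
  | nil => simp [forPassA] at h
  | cons s rest ih =>
    simp only [forPassA] at h ⊢
    split_ifs at h ⊢ with hend
    · have hne : text ≠ [] := by
        intro hnil; rw [hnil] at hend; simp [PySem.Chars.endswith, List.isSuffixOf] at hend
      refine lt_of_le_of_lt (le_trans (forPassA_fst_le _ _ _) (pv_len_strip_le _))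
        (pv_len_slice_neg_lt _ _ (by push_cast [List.length_cons]; omega) hne)
    · exact ih _ h


-- fuel lemmas: the declared fuel amounts are always sufficient
theorem pv_skipWsF_tw : ∀ (f : Nat) (rev : List Char) (j : Nat), rev.length - j ≤ f →
    skipWsBF f rev j = j + (List.takeWhile PySem.Chars.isspace (rev.drop j)).length := by
  intro f
  induction f with
  | zero =>
    intro rev j h
    rw [skipWsBF, List.drop_eq_nil_of_le (by omega)]
    simp
  | succ f ih =>
    intro rev j h
    rw [skipWsBF]
    split
    · rename_i hlt
      by_cases hsp : PySem.Chars.isspace rev[j] = true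
      · rw [if_pos hsp, ih rev (j + 1) (by omega), List.drop_eq_getElem_cons hlt,
          List.takeWhile_cons_of_pos hsp]
        simp
        omega
      · rw [if_neg hsp, List.drop_eq_getElem_cons hlt, List.takeWhile_cons_of_neg (by simpa using hsp)]
        simp
    · rename_i hge
      rw [List.drop_eq_nil_of_le (by omega)]
      simp

theorem pv_skipWs_tw (rev : List Char) (i : Nat) :
    skipWsB rev i = i + (List.takeWhile PySem.Chars.isspace (rev.drop i)).length :=
  pv_skipWsF_tw _ rev i (by omega)

theorem skipWsB_ge (rev : List Char) (j : Nat) : j ≤ skipWsB rev j := by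
  rw [pv_skipWs_tw]
  omega

theorem findTokB_bound (toks : List (List Char)) (rev : List Char) (j i' : Nat)
    (hne : ∀ t ∈ toks, t ≠ []) (h : findTokB toks rev j = some i') :
    j < i' ∧ i' ≤ rev.length := by
  induction toks with
  | nil => simp [findTokB] at h
  | cons tok rest ih =>
    simp only [findTokB] at h
    split_ifs at h with hsw
    · cases h
      have hpre : tok <+: rev.drop j := (PySem.Chars.startswith_iff _ _).mp hsw
      have hlen := hpre.length_le
      have htne : tok ≠ [] := hne tok (by simp)
      have : 0 < tok.length := List.length_pos_iff.mpr htne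
      simp [List.length_drop] at hlen
      omega
    · exact ih (fun t ht => hne t (by simp [ht])) h

theorem pv_findTok_drop_none (toks : List (List Char)) (rev : List Char) (j : Nat)
    (hne : ∀ t ∈ toks, t ≠ []) (hj : rev.length ≤ j) : findTokB toks rev j = none := by
  induction toks with
  | nil => simp [findTokB]
  | cons tok rest ih =>
    simp only [findTokB]
    rw [List.drop_eq_nil_of_le hj]
    have : ¬ PySem.Chars.startswith [] tok = true := by
      intro hc
      exact hne tok (by simp) (List.prefix_nil.mp ((PySem.Chars.startswith_iff _ _).mp hc))
    rw [if_neg this]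
    exact ih (fun t ht => hne t (by simp [ht]))

theorem pv_skipWs_high {rev : List Char} {i : Nat} (h : rev.length ≤ i) : skipWsB rev i = i := by
  rw [pv_skipWs_tw, List.drop_eq_nil_of_le h]
  simp

theorem pv_loopBF_congr : ∀ (f1 f2 : Nat) (rev : List Char) (i : Nat),
    rev.length + 1 - i ≤ f1 → rev.length + 1 - i ≤ f2 → loopBF f1 rev i = loopBF f2 rev i := by
  intro f1
  induction f1 with
  | zero =>
    intro f2 rev i h1 h2
    have hi : rev.length < i := by omega
    cases f2 with
    | zero => rfl
    | succ g =>
      rw [loopBF, loopBF]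
      simp only [pv_skipWs_high (by omega : rev.length ≤ i),
        pv_findTok_drop_none tokensB rev i (by decide) (by omega)]
  | succ f1 ih =>
    intro f2 rev i h1 h2
    cases f2 with
    | zero =>
      have hi : rev.length < i := by omega
      rw [loopBF, loopBF]
      simp only [pv_skipWs_high (by omega : rev.length ≤ i),
        pv_findTok_drop_none tokensB rev i (by decide) (by omega)]
    | succ g =>
      simp only [loopBF]
      cases hF : findTokB tokensB rev (skipWsB rev i) with
      | none => rfl
      | some i' =>
        have hb := findTokB_bound tokensB rev (skipWsB rev i) i' (by decide) hF
        have hge := skipWsB_ge rev i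
        exact ih g rev i' (by omega) (by omega)

theorem pv_loopB_none {rev : List Char} {i : Nat}
    (h : findTokB tokensB rev (skipWsB rev i) = none) : loopB rev i = i := by
  rw [loopB]
  cases hn : rev.length + 1 - i with
  | zero => rfl
  | succ f => rw [loopBF, h]

theorem pv_loopB_some {rev : List Char} {i i' : Nat}
    (h : findTokB tokensB rev (skipWsB rev i) = some i') : loopB rev i = loopB rev i' := by
  have hb := findTokB_bound tokensB rev (skipWsB rev i) i' (by decide) h
  have hge := skipWsB_ge rev i
  rw [loopB, loopB]
  cases hn : rev.length + 1 - i with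
  | zero => omega
  | succ f =>
    rw [loopBF, h]
    exact pv_loopBF_congr f (rev.length + 1 - i') rev i' (by omega) (by omega)

theorem pv_loopBF_le : ∀ (f : Nat) (rev : List Char) (i : Nat), i ≤ rev.length →
    loopBF f rev i ≤ rev.length := by
  intro f
  induction f with
  | zero => intro rev i h; exact h
  | succ f ih =>
    intro rev i h
    simp only [loopBF]
    cases hF : findTokB tokensB rev (skipWsB rev i) with
    | none => exact h
    | some i' =>
      exact ih rev i' (findTokB_bound tokensB rev (skipWsB rev i) i' (by decide) hF).2

theorem pv_loopB_le (rev : List Char) (i : Nat) (h : i ≤ rev.length) :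
    loopB rev i ≤ rev.length := pv_loopBF_le _ rev i h

theorem pv_whileAF_congr : ∀ (f1 f2 : Nat) (text : List Char),
    text.length + 1 ≤ f1 → text.length + 1 ≤ f2 → whileAF f1 text = whileAF f2 text := by
  intro f1
  induction f1 with
  | zero => intro f2 text h1 _; omega
  | succ f1 ih =>
    intro f2 text h1 h2
    cases f2 with
    | zero => omega
    | succ g =>
      simp only [whileAF]
      by_cases hch : (forPassA suffsA text false).2 = true
      · rw [if_pos hch, if_pos hch]
        have hlt := forPassA_lt suffsA text hch
        exact ih g _ (by omega) (by omega)
      · rw [if_neg hch, if_neg hch]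

theorem pv_whileA_true {text : List Char}
    (h : (forPassA suffsA text false).2 = true) :
    whileA text = whileA (forPassA suffsA text false).1 := by
  have hlt := forPassA_lt suffsA text h
  rw [whileA, whileA, whileAF]
  simp only [h, if_true]
  exact pv_whileAF_congr (text.length) ((forPassA suffsA text false).1.length + 1) _ (by omega) (by omega)

theorem pv_whileA_false {text : List Char}
    (h : (forPassA suffsA text false).2 = false) :
    whileA text = (forPassA suffsA text false).1 := by
  rw [whileA, whileAF]
  simp only [h, Bool.false_eq_true, if_false]


-- basic whitespace / strip facts
theorem pv_tw_dropWhile {p : Char → Bool} (l : List Char) :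
    List.takeWhile p (List.dropWhile p l) = [] := by
  induction l with
  | nil => simp
  | cons a l ih =>
    by_cases h : p a
    · simpa [List.dropWhile_cons, h] using ih
    · simp [List.dropWhile_cons, h, List.takeWhile_cons, h]

theorem pv_dropWhile_of_tw_nil {p : Char → Bool} {l : List Char}
    (h : List.takeWhile p l = []) : List.dropWhile p l = l := by
  cases l with
  | nil => simp
  | cons a l =>
    by_cases hp : p a
    · simp [List.takeWhile_cons, hp] at h
    · simp [List.dropWhile_cons, hp]

theorem pv_prefix_tw_nil {p : Char → Bool} {l' l : List Char}
    (hpre : l' <+: l) (h : List.takeWhile p l = []) : List.takeWhile p l' = [] := by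
  obtain ⟨r, hr⟩ := hpre
  subst hr
  cases l' with
  | nil => simp
  | cons a t =>
    by_cases hp : p a
    · simp [List.takeWhile_cons, hp] at h
    · simp [List.takeWhile_cons, hp]

theorem pv_rstrip_prefix (y : List Char) : PySem.Chars.rstrip y <+: y := by
  have := List.dropWhile_suffix (l := y.reverse) PySem.Chars.isspace
  rw [PySem.Chars.rstrip]
  rw [← List.reverse_suffix]
  simpa using this

theorem pv_rstrip_idem (y : List Char) :
    PySem.Chars.rstrip (PySem.Chars.rstrip y) = PySem.Chars.rstrip y := by
  simp only [PySem.Chars.rstrip, List.reverse_reverse]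
  rw [pv_dropWhile_of_tw_nil (pv_tw_dropWhile _)]

theorem pv_rstrip_tw_nil {y : List Char} (h : List.takeWhile PySem.Chars.isspace y = []) :
    List.takeWhile PySem.Chars.isspace (PySem.Chars.rstrip y) = [] :=
  pv_prefix_tw_nil (pv_rstrip_prefix y) h

theorem pv_lstrip_of_tw_nil {y : List Char} (h : List.takeWhile PySem.Chars.isspace y = []) :
    PySem.Chars.lstrip y = y := pv_dropWhile_of_tw_nil h

theorem pv_strip_inv (x : List Char) :
    PySem.Chars.lstrip (PySem.Chars.strip x) = PySem.Chars.strip x ∧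
    PySem.Chars.rstrip (PySem.Chars.strip x) = PySem.Chars.strip x := by
  constructor
  · exact pv_lstrip_of_tw_nil (pv_rstrip_tw_nil (pv_tw_dropWhile x))
  · simp [PySem.Chars.strip, pv_rstrip_idem]

theorem pv_rev_tw_nil {text : List Char} (h : PySem.Chars.rstrip text = text) :
    List.takeWhile PySem.Chars.isspace text.reverse = [] := by
  conv_lhs => rw [← h]
  rw [PySem.Chars.rstrip, List.reverse_reverse]
  exact pv_tw_dropWhile _

theorem pv_rstrip_append_ws {w x : List Char}
    (hw : ∀ c ∈ w, PySem.Chars.isspace c = true) :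
    PySem.Chars.rstrip (x ++ w) = PySem.Chars.rstrip x := by
  simp only [PySem.Chars.rstrip, List.reverse_append]
  congr 1
  induction w using List.reverseRecOn with
  | nil => simp
  | append_singleton w c ih =>
    simp only [List.reverse_append, List.reverse_cons, List.reverse_nil, List.nil_append,
      List.cons_append, List.dropWhile_cons]
    rw [hw c (by simp)]
    simp only [if_true]
    exact ih (fun d hd => hw d (by simp [hd]))

-- slice characterizations
theorem pv_slice_take_neg (xs : List Char) (L : Nat) (hL : 1 ≤ L) :
    PySem.Chars.slice xs none (some (-(L : Int))) = xs.take (xs.length - L) := by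
  simp only [PySem.Chars.slice_eq_listSlice, PySem.List.slice, PySem.List.clampIdx]
  split_ifs <;> simp <;> omega

theorem pv_slice_take_nonneg (xs : List Char) (e : Nat) (he : e ≤ xs.length) :
    PySem.Chars.slice xs none (some ((e : Nat) : Int)) = xs.take e := by
  simp only [PySem.Chars.slice_eq_listSlice, PySem.List.slice, PySem.List.clampIdx]
  split_ifs <;> simp <;> omega

-- the canonical normal form both programs compute
def pvN (text : List Char) : List Char :=
  match hf : suffsA.find? (fun s => PySem.Chars.endswith text (' ' :: s)) with
  | some s =>
    pvN (PySem.Chars.strip (PySem.Chars.slice text none (some (-(((' ' :: s).length : Nat) : Int)))))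
  | none => text
termination_by text.length
decreasing_by
  have hend := List.find?_some hf
  have hne : text ≠ [] := by
    intro hnil; rw [hnil] at hend; simp [PySem.Chars.endswith, List.isSuffixOf] at hend
  exact lt_of_le_of_lt (pv_len_strip_le _) (pv_len_slice_neg_lt _ _ (by push_cast [List.length_cons]; omega) hne)

-- uniqueness: at most one color token is a suffix of a given text
theorem pv_unique {text s1 s2 : List Char} (h1 : s1 ∈ suffsA) (h2 : s2 ∈ suffsA)
    (e1 : (' ' :: s1) <:+ text) (e2 : (' ' :: s2) <:+ text) : s1 = s2 := by
  have hd : ∀ a ∈ suffsA, ∀ b ∈ suffsA, ((' ' :: a) <:+ (' ' :: b)) → a = b := by decide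
  rcases List.suffix_or_suffix_of_suffix e1 e2 with h | h
  · exact hd s1 h1 s2 h2 h
  · exact (hd s2 h2 s1 h1 h).symm

-- A-side: forPassA preserves pvN, and an unchanged pass means no token matches
theorem pvN_none {text : List Char}
    (h : suffsA.find? (fun s => PySem.Chars.endswith text (' ' :: s)) = none) :
    pvN text = text := by
  rw [pvN.eq_def]
  split
  · rename_i s heq; rw [h] at heq; cases heq
  · rfl

theorem pvN_some {text s : List Char}
    (h : suffsA.find? (fun s => PySem.Chars.endswith text (' ' :: s)) = some s) :
    pvN text =
      pvN (PySem.Chars.strip (PySem.Chars.slice text none (some (-(((' ' :: s).length : Nat) : Int))))) := by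
  conv_lhs => rw [pvN.eq_def]
  split
  · rename_i s' heq; rw [h] at heq; cases heq; rfl
  · rename_i heq; rw [h] at heq; cases heq

theorem pv_A1 (ss : List (List Char)) (text : List Char) (ch : Bool)
    (hsub : ∀ s ∈ ss, s ∈ suffsA) : pvN (forPassA ss text ch).1 = pvN text := by
  induction ss generalizing text ch with
  | nil => simp [forPassA]
  | cons s rest ih =>
    simp only [forPassA]
    by_cases hend : PySem.Chars.endswith text (' ' :: s) = true
    · rw [if_pos hend, ih _ true (fun t ht => hsub t (by simp [ht]))]
      have hs : s ∈ suffsA := hsub s (by simp)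
      have hsome : (suffsA.find? (fun s' => PySem.Chars.endswith text (' ' :: s'))).isSome := by
        exact List.find?_isSome.mpr ⟨s, hs, hend⟩
      obtain ⟨s', hfind⟩ := Option.isSome_iff_exists.mp hsome
      have hps' : PySem.Chars.endswith text (' ' :: s') = true := by
        simpa using List.find?_some hfind
      have hs'eq : s' = s :=
        pv_unique (List.mem_of_find?_eq_some hfind) hs
          ((PySem.Chars.endswith_iff _ _).mp hps')
          ((PySem.Chars.endswith_iff _ _).mp hend)
      rw [pvN_some hfind, hs'eq]
    · rw [if_neg hend]
      exact ih _ ch (fun t ht => hsub t (by simp [ht]))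

theorem pv_A2 (ss : List (List Char)) (text : List Char)
    (h : (forPassA ss text false).2 = false) :
    (forPassA ss text false).1 = text ∧
      ∀ s ∈ ss, PySem.Chars.endswith text (' ' :: s) = false := by
  induction ss with
  | nil => exact ⟨by simp [forPassA], by simp⟩
  | cons s rest ih =>
    simp only [forPassA] at h
    by_cases hend : PySem.Chars.endswith text (' ' :: s) = true
    · rw [if_pos hend] at h
      rw [forPassA_true] at h
      cases h
    · rw [if_neg hend] at h
      obtain ⟨h1, h2⟩ := ih h
      refine ⟨by simp only [forPassA, if_neg hend]; exact h1, ?_⟩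
      intro s' hs'
      rcases List.mem_cons.mp hs' with rfl | hmem
      · exact Bool.not_eq_true _ ▸ (by simpa using hend)
      · exact h2 s' hmem

theorem pv_whileA_eq_N (text : List Char) : whileA text = pvN text := by
  suffices H : ∀ n, ∀ text : List Char, text.length ≤ n → whileA text = pvN text from
    H text.length text le_rfl
  intro n
  induction n with
  | zero =>
    intro text hlen
    have htnil : text = [] := List.length_eq_zero_iff.mp (by omega)
    subst htnil
    have h2 : (forPassA suffsA [] false).2 = false := by decide
    rw [pv_whileA_false h2, (pv_A2 suffsA [] h2).1, pvN_none (by decide)]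
  | succ n ih =>
    intro text hlen
    by_cases h2 : (forPassA suffsA text false).2 = true
    · have hlt := forPassA_lt suffsA text h2
      rw [pv_whileA_true h2, ih _ (by omega), pv_A1 suffsA text false (fun _ h => h)]
    · have h2' : (forPassA suffsA text false).2 = false := by
        cases hb : (forPassA suffsA text false).2
        · rfl
        · exact absurd hb h2
      obtain ⟨h1, hno⟩ := pv_A2 suffsA text h2'
      rw [pv_whileA_false h2', h1, pvN_none (List.find?_eq_none.mpr (fun s hs => by simp [hno s hs]))]

-- B-side machinery
theorem pv_findTok_shift (toks : List (List Char)) (rev : List Char) (j : Nat) :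
    findTokB toks rev j = (findTokB toks (rev.drop j) 0).map (fun t => j + t) := by
  induction toks with
  | nil => simp [findTokB]
  | cons tok rest ih =>
    simp only [findTokB, List.drop_zero]
    by_cases hsw : PySem.Chars.startswith (rev.drop j) tok = true
    · simp [hsw]
    · simp [hsw, ih]

theorem pv_findTok_none (toks : List (List Char)) (r : List Char) :
    findTokB toks r 0 = none ↔ ∀ tok ∈ toks, ¬ (tok <+: r) := by
  induction toks with
  | nil => simp [findTokB]
  | cons tok rest ih =>
    simp only [findTokB, List.drop_zero]
    by_cases hsw : PySem.Chars.startswith r tok = true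
    · simp only [hsw, if_true]
      constructor
      · intro h; cases h
      · intro h
        exact absurd ((PySem.Chars.startswith_iff _ _).mp hsw) (h tok (by simp))
    · simp only [hsw, if_false, Bool.false_eq_true]
      rw [ih]
      constructor
      · intro h tok' htok'
        rcases List.mem_cons.mp htok' with rfl | hmem
        · intro hpre; exact hsw ((PySem.Chars.startswith_iff _ _).mpr hpre)
        · exact h tok' hmem
      · intro h tok' htok'; exact h tok' (by simp [htok'])

theorem pv_findTok_some (toks : List (List Char)) (r : List Char) (i' : Nat)
    (h : findTokB toks r 0 = some i') : ∃ tok ∈ toks, (tok <+: r) ∧ i' = tok.length := by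
  induction toks with
  | nil => simp [findTokB] at h
  | cons tok rest ih =>
    simp only [findTokB, List.drop_zero] at h
    by_cases hsw : PySem.Chars.startswith r tok = true
    · rw [if_pos hsw] at h
      cases h
      exact ⟨tok, by simp, (PySem.Chars.startswith_iff _ _).mp hsw, by omega⟩
    · rw [if_neg hsw] at h
      obtain ⟨t, ht, hp, he⟩ := ih h
      exact ⟨t, by simp [ht], hp, he⟩

def pvG (r : List Char) : List Char := r.drop (loopB r 0)

theorem pv_T (m : Nat) : ∀ (r : List Char) (i : Nat), i ≤ r.length → r.length - i = m →
    r.drop (loopB r i) = pvG (r.drop i) := by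
  induction m using Nat.strong_induction_on with
  | _ m IH =>
    intro r i hi hm
    set k := (List.takeWhile PySem.Chars.isspace (List.drop i r)).length with hk
    have hj : skipWsB r i = i + k := pv_skipWs_tw r i
    have hj0 : skipWsB (r.drop i) 0 = k := by rw [pv_skipWs_tw, List.drop_zero]; omega
    have hdd : (r.drop i).drop k = r.drop (i + k) := by rw [List.drop_drop, Nat.add_comm]
    have hshift : findTokB tokensB r (i + k) =
        (findTokB tokensB ((r.drop i).drop k) 0).map (fun t => (i + k) + t) := by
      rw [pv_findTok_shift, hdd]
    have hshift2 : findTokB tokensB (r.drop i) k =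
        (findTokB tokensB ((r.drop i).drop k) 0).map (fun t => k + t) :=
      pv_findTok_shift tokensB (r.drop i) k
    cases hF : findTokB tokensB ((r.drop i).drop k) 0 with
    | none =>
      have o1 : findTokB tokensB r (skipWsB r i) = none := by rw [hj, hshift, hF]; rfl
      have o2 : findTokB tokensB (r.drop i) (skipWsB (r.drop i) 0) = none := by
        rw [hj0, hshift2, hF]; rfl
      rw [pv_loopB_none o1]
      unfold pvG
      rw [pv_loopB_none o2, List.drop_zero]
    | some t =>
      have o1 : findTokB tokensB r (skipWsB r i) = some (i + k + t) := by
        rw [hj, hshift, hF]; rfl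
      have o2 : findTokB tokensB (r.drop i) (skipWsB (r.drop i) 0) = some (k + t) := by
        rw [hj0, hshift2, hF]; rfl
      have hb1 := findTokB_bound tokensB r (skipWsB r i) _ (by decide) o1
      rw [hj] at hb1
      rw [pv_loopB_some o1]
      unfold pvG
      rw [pv_loopB_some o2]
      have e1 : r.drop (loopB r (i + k + t)) = pvG (r.drop (i + k + t)) :=
        IH (r.length - (i + k + t)) (by omega) r (i + k + t) (by omega) rfl
      have hdlen : (r.drop i).length = r.length - i := by simp
      have e2 : (r.drop i).drop (loopB (r.drop i) (k + t)) =
          pvG ((r.drop i).drop (k + t)) := by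
        refine IH ((r.drop i).length - (k + t)) ?_ (r.drop i) (k + t) ?_ rfl <;> omega
      have hdd2 : (r.drop i).drop (k + t) = r.drop (i + k + t) := by
        rw [List.drop_drop]
        congr 1
        omega
      rw [e1, e2, hdd2]

theorem pv_W (r : List Char) :
    PySem.Chars.rstrip (pvG r).reverse =
      PySem.Chars.rstrip (pvG (List.dropWhile PySem.Chars.isspace r)).reverse := by
  set r' := List.dropWhile PySem.Chars.isspace r with hr'
  set k := (List.takeWhile PySem.Chars.isspace r).length with hk
  have hrk : r.drop k = r' := by
    conv_lhs => rw [← List.takeWhile_append_dropWhile (p := PySem.Chars.isspace) (l := r)]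
    rw [← hr', List.drop_left]
  have hs0 : skipWsB r 0 = k := by rw [pv_skipWs_tw, List.drop_zero]; omega
  have hs0' : skipWsB r' 0 = 0 := by
    rw [pv_skipWs_tw, List.drop_zero, hr', pv_tw_dropWhile]
    simp
  have hshift := pv_findTok_shift tokensB r k
  rw [hrk] at hshift
  cases hF : findTokB tokensB r' 0 with
  | none =>
    have o1 : findTokB tokensB r (skipWsB r 0) = none := by rw [hs0, hshift, hF]; rfl
    have o2 : findTokB tokensB r' (skipWsB r' 0) = none := by rw [hs0', hF]
    unfold pvG
    rw [pv_loopB_none o1, pv_loopB_none o2, List.drop_zero, List.drop_zero]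
    conv_lhs => rw [← List.takeWhile_append_dropWhile (p := PySem.Chars.isspace) (l := r)]
    rw [List.reverse_append, ← hr']
    exact pv_rstrip_append_ws (by
      intro c hc
      exact List.mem_takeWhile_imp (by simpa using hc))
  | some t =>
    have o1 : findTokB tokensB r (skipWsB r 0) = some (k + t) := by rw [hs0, hshift, hF]; rfl
    have o2 : findTokB tokensB r' (skipWsB r' 0) = some t := by rw [hs0']; exact hF
    have hb := findTokB_bound tokensB r (skipWsB r 0) (k + t) (by decide) o1
    have hb' := findTokB_bound tokensB r' (skipWsB r' 0) t (by decide) o2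
    rw [hs0] at hb
    rw [hs0'] at hb'
    unfold pvG
    rw [pv_loopB_some o1, pv_loopB_some o2]
    have e1 : r.drop (loopB r (k + t)) = pvG (r.drop (k + t)) :=
      pv_T (r.length - (k + t)) r (k + t) (by omega) rfl
    have e2 : r'.drop (loopB r' t) = pvG (r'.drop t) :=
      pv_T (r'.length - t) r' t (by omega) rfl
    have hsame : r.drop (k + t) = r'.drop t := by
      rw [← hrk, List.drop_drop]
    rw [e1, e2, hsame]

theorem pv_tokensB_eq : tokensB = suffsA.map (fun s => (' ' :: s).reverse) := by decide

theorem pv_tw_nil_of_dropWhile {p : Char → Bool} {l : List Char}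
    (h : List.dropWhile p l = l) : List.takeWhile p l = [] := by
  cases l with
  | nil => simp
  | cons a l =>
    by_cases hp : p a
    · have hlen := congrArg List.length h
      rw [List.dropWhile_cons_of_pos hp] at hlen
      have := List.length_dropWhile_le p l
      simp at hlen
      omega
    · simp [List.takeWhile_cons_of_neg hp]

theorem pv_B1 (n : Nat) : ∀ (text : List Char), text.length ≤ n →
    PySem.Chars.lstrip text = text → PySem.Chars.rstrip text = text →
    PySem.Chars.rstrip (pvG text.reverse).reverse = pvN text := by
  induction n with
  | zero =>
    intro text hlen _ _
    have htnil : text = [] := List.length_eq_zero_iff.mp (by omega)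
    subst htnil
    have h0 : skipWsB ([] : List Char).reverse 0 = 0 := by
      rw [pv_skipWs_tw]; simp
    unfold pvG
    rw [pv_loopB_none (by rw [h0]; decide), pvN_none (by decide)]
    decide
  | succ n ih =>
    intro text hlen hl hr
    have htw : List.takeWhile PySem.Chars.isspace text.reverse = [] := pv_rev_tw_nil hr
    have hs0 : skipWsB text.reverse 0 = 0 := by
      rw [pv_skipWs_tw, List.drop_zero, htw]; simp
    cases hF : findTokB tokensB text.reverse 0 with
    | none =>
      unfold pvG
      rw [pv_loopB_none (by rw [hs0]; exact hF), List.drop_zero, List.reverse_reverse, hr]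
      refine (pvN_none (List.find?_eq_none.mpr fun s hs => ?_)).symm
      have hnp := (pv_findTok_none tokensB text.reverse).mp hF ((' ' :: s).reverse)
        (by rw [pv_tokensB_eq]; exact List.mem_map.mpr ⟨s, hs, rfl⟩)
      intro hcontr
      exact hnp (List.reverse_prefix.mpr ((PySem.Chars.endswith_iff _ _).mp hcontr))
    | some i' =>
      obtain ⟨tok, htokmem, hpre, hi'⟩ := pv_findTok_some tokensB text.reverse i' hF
      rw [pv_tokensB_eq] at htokmem
      obtain ⟨s, hs, rfl⟩ := List.mem_map.mp htokmem
      have hsuf : (' ' :: s) <:+ text := List.reverse_prefix.mp hpre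
      have hend : PySem.Chars.endswith text (' ' :: s) = true :=
        (PySem.Chars.endswith_iff _ _).mpr hsuf
      have hsome : (suffsA.find? (fun s' => PySem.Chars.endswith text (' ' :: s'))).isSome :=
        List.find?_isSome.mpr ⟨s, hs, hend⟩
      obtain ⟨s', hfind⟩ := Option.isSome_iff_exists.mp hsome
      have hps' : PySem.Chars.endswith text (' ' :: s') = true := by
        simpa using List.find?_some hfind
      have hs'eq : s' = s :=
        pv_unique (List.mem_of_find?_eq_some hfind) hs
          ((PySem.Chars.endswith_iff _ _).mp hps') hsuf
      rw [pvN_some hfind, hs'eq]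
      have hi'tl : i' = (' ' :: s).length := by
        rw [hi', List.length_reverse]
      have htlen : (' ' :: s).length ≤ text.length := by
        have := hsuf.length_le
        omega
      have htpos : 1 ≤ text.length := by
        have := hsuf.length_le
        simp at this
        omega
      -- the stripped remainder
      rw [pv_slice_take_neg text ((' ' :: s).length) (by simp)]
      set pre := text.take (text.length - (' ' :: s).length) with hpre'
      have htwtext : List.takeWhile PySem.Chars.isspace text = [] := pv_tw_nil_of_dropWhile hl
      have htwpre : List.takeWhile PySem.Chars.isspace pre = [] :=
        pv_prefix_tw_nil (List.take_prefix _ _) htwtext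
      have hstrip_pre : PySem.Chars.strip pre = PySem.Chars.rstrip pre := by
        rw [PySem.Chars.strip, pv_lstrip_of_tw_nil htwpre]
      have haux : (text.reverse.drop ((' ' :: s).length)).reverse = pre := by
        rw [List.reverse_drop, List.reverse_reverse, List.length_reverse]
      have hrev_pre : pre.reverse = text.reverse.drop i' := by
        rw [hi'tl, ← haux, List.reverse_reverse]
      -- B side: one step, then transfer and whitespace absorption
      unfold pvG
      rw [pv_loopB_some (by rw [hs0]; exact hF)]
      have hi'le : i' ≤ text.reverse.length := (findTokB_bound tokensB text.reverse 0 i' (by decide) hF).2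
      rw [pv_T (text.reverse.length - i') text.reverse i' (by omega) rfl]
      have hW := pv_W (text.reverse.drop i')
      have hdw : List.dropWhile PySem.Chars.isspace (text.reverse.drop i') =
          (PySem.Chars.strip pre).reverse := by
        rw [hstrip_pre, PySem.Chars.rstrip, List.reverse_reverse, hrev_pre]
      rw [hW, hdw]
      -- induction hypothesis on the stripped remainder
      have hinv := pv_strip_inv pre
      have hlen1 : (PySem.Chars.strip pre).length ≤ n := by
        have h1 := pv_len_strip_le pre
        have h2 : pre.length ≤ text.length - (' ' :: s).length := by
          rw [hpre']
          simp
        have h3 : (' ' :: s).length ≥ 1 := by simp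
        omega
      exact ih (PySem.Chars.strip pre) hlen1 hinv.1 hinv.2

-- ===== VERDICT (by name: the statement is the Claim_ definition above) =====
theorem strip_color_suffixes_spec : Claim_equal_strip_color_suffixes := by
  intro name _
  unfold Spec_strip_color_suffixes strip_color_suffixes strip_color_suffixes_alt
  simp only []
  set text := PySem.Chars.strip name.toList with htext
  obtain ⟨hl, hr⟩ := pv_strip_inv name.toList
  have hle : loopB text.reverse 0 ≤ text.length := by
    have := pv_loopB_le text.reverse 0 (by omega)
    simpa using this
  have hcast : ((text.length : Int) - (loopB text.reverse 0 : Nat)) =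
      (((text.length - loopB text.reverse 0 : Nat) : Nat) : Int) := by push_cast; omega
  rw [hcast, pv_slice_take_nonneg _ _ (by omega)]
  have htake : text.take (text.length - loopB text.reverse 0) = (pvG text.reverse).reverse := by
    unfold pvG
    rw [List.reverse_drop]
    simp
  rw [htake, pv_B1 text.length text le_rfl hl hr, pv_whileA_eq_N]
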